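-- pv_equiv track=rewrite | github.com/kuznetsovvj/education | algorithms/codeforces/1702b.py | check
-- ===== SOURCE A (Python) =====
-- def check(w):
--     z = set()
--     res = 1
--     for i in w:
--         if i in z:
--             continue
--         # i not in z
--         if len(z) == 3:
--             res += 1
--             z.clear()
--         z.add(i)
--     return res
-- ===== SOURCE B (Python) =====
-- def check(w):
--     n = len(w)
--     # pass 1: sliding window -- for every start l, jump[l] = end (exclusive) of the
--     # maximal block starting at l that uses at most 3 distinct characters
--     jump = [0] * n
--     cnt = {}
--     distinct = 0
--     r = 0
--     for l in range(n):
--         while r < n and (cnt.get(w[r], 0) > 0 or distinct < 3):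
--             c = w[r]
--             cnt[c] = cnt.get(c, 0) + 1
--             if cnt[c] == 1:
--                 distinct += 1
--             r += 1
--         jump[l] = r
--         c = w[l]
--         cnt[c] -= 1
--         if cnt[c] == 0:
--             distinct -= 1
--     # pass 2: chase the jump pointers from 0; each jump short of the end opens a new group
--     res = 1
--     i = 0
--     while i < n and jump[i] < n:
--         res += 1
--         i = jump[i]
--     return res
-- ===== Notes on version B (the rewrite author's own statement) =====
-- stated objective: alternative
-- what changed: B replaces A's single greedy scan (a set that is cleared at each 4th distinct character) by two separate passes: a sliding-window pass with a count dictionary that precomputes, for every start index, the end of the maximal block using at most 3 distinct characters, followed by a pointer chase over that jump table counting the groups.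
import Mathlib
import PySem

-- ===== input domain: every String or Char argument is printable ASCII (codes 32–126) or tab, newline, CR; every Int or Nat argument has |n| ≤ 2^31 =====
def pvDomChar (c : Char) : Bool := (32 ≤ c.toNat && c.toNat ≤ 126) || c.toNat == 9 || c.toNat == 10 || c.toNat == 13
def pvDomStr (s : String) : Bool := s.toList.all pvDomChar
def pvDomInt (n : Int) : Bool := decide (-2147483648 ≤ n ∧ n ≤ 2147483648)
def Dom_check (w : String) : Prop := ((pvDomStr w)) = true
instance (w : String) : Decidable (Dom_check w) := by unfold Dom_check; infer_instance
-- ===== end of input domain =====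

-- B replaces A's single greedy scan by two passes: a sliding-window pass that precomputes,
-- for every start index, the end of the maximal block with ≤ 3 distinct characters, then a
-- pointer chase over that table (objective: alternative; same value, not claimed faster).

-- ===== PORT A =====
-- A's for-loop over the characters, carrying (z, res) just like the Python.
def checkGo (z : PySem.Set Char) (res : Int) : List Char → Int
  | [] => res
  | i :: rest =>
    if PySem.Set.contains z i then checkGo z res rest
    else if PySem.Set.len z = 3 then checkGo (PySem.Set.add PySem.Set.empty i) (res + 1) rest
    else checkGo (PySem.Set.add z i) res rest

def check (w : String) : Int := checkGo PySem.Set.empty 1 w.toList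

-- ===== PORT B =====
-- Source B's inner while: extend r while w[r] is already in the window (count > 0) or the
-- window has fewer than 3 distinct characters; state (cnt, distinct, r).
def innerB (s : List Char) (n : Nat) (cnt : PySem.Dict Char Int) (distinct : Int) (r : Nat) :
    PySem.Dict Char Int × Int × Nat :=
  if h : r < n ∧ (0 < cnt.getD (s.getD r ' ') 0 ∨ distinct < 3) then
    let c := s.getD r ' '
    let cnt' := cnt.insert c (cnt.getD c 0 + 1)
    innerB s n cnt' (if cnt'.getD c 0 = 1 then distinct + 1 else distinct) (r + 1)
  else (cnt, distinct, r)
  termination_by n - r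
  decreasing_by omega

-- Source B's for-loop over l: run the inner while, record jump[l] = r, then remove w[l].
def outerB (s : List Char) (n : Nat) : List Nat × PySem.Dict Char Int × Int × Nat :=
  (List.range n).foldl
    (fun st l =>
      let t := innerB s n st.2.1 st.2.2.1 st.2.2.2
      let jump := st.1.set l t.2.2
      let c := s.getD l ' '
      let cnt2 := t.1.insert c (t.1.getD c 0 - 1)
      (jump, cnt2, (if cnt2.getD c 0 = 0 then t.2.1 - 1 else t.2.1), t.2.2))
    (List.replicate n 0, PySem.Dict.empty, 0, 0)

-- Source B's final while: chase the jump pointers (fuel n makes the while structurally total;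
-- the loop itself takes at most n steps since every jump moves i strictly forward).
def chaseB (jump : List Nat) (n : Nat) : Nat → Nat → Int → Int
  | 0, _, res => res
  | fuel + 1, i, res =>
    if i < n ∧ jump.getD i 0 < n then chaseB jump n fuel (jump.getD i 0) (res + 1) else res

def check_alt (w : String) : Int :=
  chaseB (outerB w.toList w.toList.length).1 w.toList.length w.toList.length 0 1

-- ===== PRECONDITION & SPEC =====
def Spec_check (w : String) (out : Int) : Prop := out = check_alt w
instance (w : String) (out : Int) : Decidable (Spec_check w out) := by unfold Spec_check; infer_instance

-- ===== CLAIM (what is proved, stated in full; the proofs are below) =====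
def Claim_equal_check : Prop := ∀ (w : String), Dom_check w → Spec_check w (check w)

-- ===== LEMMAS AND PROOFS =====

-- Proof-layer greedy: consume characters while the current one is in z or z has < 3 elements.
def gInner (z : PySem.Set Char) : List Char → PySem.Set Char × List Char
  | [] => (z, [])
  | c :: rest =>
    if PySem.Set.contains z c || PySem.Set.len z < 3 then gInner (PySem.Set.add z c) rest
    else (z, c :: rest)

theorem gInner_len_le (z : PySem.Set Char) (l : List Char) :
    (gInner z l).2.length ≤ l.length := by
  induction l generalizing z with
  | nil => simp [gInner]
  | cons c rest ih =>
    simp only [gInner]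
    split
    · exact le_trans (ih _) (Nat.le_succ _)
    · exact le_refl _

theorem gInner_empty_cons (c : Char) (rest : List Char) :
    gInner PySem.Set.empty (c :: rest) = gInner (PySem.Set.add PySem.Set.empty c) rest := by
  simp [gInner, PySem.Set.empty, PySem.Set.len, PySem.Set.contains]

-- Proof-layer group recursion (A's value, group by group).
def gOuter (l : List Char) (res : Int) : Int :=
  match l with
  | [] => res
  | c :: rest =>
    let rem := (gInner PySem.Set.empty (c :: rest)).2
    if rem = [] then res else gOuter rem (res + 1)
  termination_by l.length
  decreasing_by
    rw [gInner_empty_cons]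
    exact Nat.lt_succ_of_le (gInner_len_le _ _)

theorem len_add_le (z : PySem.Set Char) (c : Char) :
    (PySem.Set.add z c).length ≤ z.length + 1 := by
  simp only [PySem.Set.add]
  split
  · exact Nat.le_succ _
  · simp

theorem checkGo_eq (l : List Char) : ∀ (z : PySem.Set Char) (res : Int),
    z.length ≤ 3 →
    checkGo z res l
      = (if (gInner z l).2 = [] then res else gOuter (gInner z l).2 (res + 1)) := by
  induction l with
  | nil => intro z res _; simp [checkGo, gInner]
  | cons c rest ih =>
    intro z res hz
    cases hc : PySem.Set.contains z c with
    | true =>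
      have hmem : c ∈ z := (PySem.Set.contains_iff z c).mp hc
      simp only [checkGo, gInner, hc, Bool.true_or, if_true, PySem.Set.add_of_mem hmem]
      exact ih z res hz
    | false =>
      simp only [checkGo, gInner, hc, Bool.false_or, Bool.false_eq_true, if_false]
      by_cases h3 : z.length = 3
      · have e1 : PySem.Set.len z = 3 := by simp [PySem.Set.len, h3]
        simp only [e1]
        norm_num
        rw [gOuter, gInner_empty_cons]
        simp only [List.cons_ne_nil, if_false]
        exact ih (PySem.Set.add PySem.Set.empty c) (res + 1)
          (le_trans (len_add_le _ _) (by simp [PySem.Set.empty]))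
      · have hlt : z.length < 3 := lt_of_le_of_ne hz h3
        have e1 : PySem.Set.len z ≠ 3 := by simp [PySem.Set.len]; omega
        have e2 : decide (PySem.Set.len z < 3) = true := by simp [PySem.Set.len]; omega
        simp only [e1, if_false, e2, if_true]
        exact ih (PySem.Set.add z c) res (le_trans (len_add_le _ _) (by omega))

theorem check_eq_gOuter (w : String) : check w = gOuter w.toList 1 := by
  unfold check
  rw [checkGo_eq w.toList PySem.Set.empty 1 (by simp [PySem.Set.empty])]
  cases h : w.toList with
  | nil => simp [gInner, gOuter]
  | cons c rest => rw [gOuter]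

-- ------- B-side lemmas -------

-- the remainder of the greedy is a suffix (a drop) of its input
theorem gInner_rest_drop (l : List Char) : ∀ (z : PySem.Set Char),
    (gInner z l).2 = l.drop (l.length - (gInner z l).2.length) := by
  induction l with
  | nil => intro z; simp [gInner]
  | cons c rest ih =>
    intro z
    simp only [gInner]
    split
    · have hle := gInner_len_le (PySem.Set.add z c) rest
      have h1 : (c :: rest).length - (gInner (PySem.Set.add z c) rest).2.length
          = (rest.length - (gInner (PySem.Set.add z c) rest).2.length) + 1 := by
        simp only [List.length_cons]; omega
      rw [h1, List.drop_succ_cons]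
      exact ih _
    · simp

-- if the greedy consumes all of pre, it resumes on appended input
theorem gInner_append (pre : List Char) : ∀ (xs : List Char) (z : PySem.Set Char),
    (gInner z pre).2 = [] → gInner z (pre ++ xs) = gInner (gInner z pre).1 xs := by
  induction pre with
  | nil => intro xs z _; simp [gInner]
  | cons c rest ih =>
    intro xs z h
    simp only [List.cons_append, gInner] at h ⊢
    split
    · rename_i hg
      simp only [hg, if_true] at h
      exact ih xs _ h
    · rename_i hg
      simp only [hg] at h
      exact absurd h (by simp)

-- membership in the final set after full consumption
theorem gInner_mem_of_consumed (l : List Char) : ∀ (z : PySem.Set Char),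
    (gInner z l).2 = [] → ∀ c, c ∈ (gInner z l).1 ↔ c ∈ z ∨ c ∈ l := by
  induction l with
  | nil => intro z _ c; simp [gInner]
  | cons a rest ih =>
    intro z h c
    simp only [gInner] at h ⊢
    split
    · rename_i hg
      simp only [hg, if_true] at h
      rw [ih _ h c, PySem.Set.mem_add]
      simp only [List.mem_cons]
      tauto
    · rename_i hg
      simp only [hg] at h
      exact absurd h (by simp)

theorem gInner_nodup (l : List Char) : ∀ (z : PySem.Set Char),
    z.Nodup → (gInner z l).1.Nodup := by
  induction l with
  | nil => intro z h; simpa [gInner] using h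
  | cons a rest ih =>
    intro z h
    simp only [gInner]
    split
    · exact ih _ (PySem.Set.nodup_add z a h)
    · exact h

theorem gInner_len_le3 (l : List Char) : ∀ (z : PySem.Set Char),
    z.length ≤ 3 → (gInner z l).1.length ≤ 3 := by
  induction l with
  | nil => intro z h; simpa [gInner] using h
  | cons a rest ih =>
    intro z h
    simp only [gInner]
    split
    · rename_i hg
      rcases Bool.or_eq_true_iff.mp hg with hc | hlt
      · have hmem : a ∈ z := (PySem.Set.contains_iff z a).mp hc
        rw [PySem.Set.add_of_mem hmem]
        exact ih z h
      · have : z.length < 3 := by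
          have := of_decide_eq_true hlt
          simpa [PySem.Set.len] using this
        exact ih _ (le_trans (len_add_le _ _) (by omega))
    · exact h

-- ≤ 3 distinct characters in z ∪ l ⇒ the greedy consumes all of l
theorem gInner_consume (l : List Char) : ∀ (z : PySem.Set Char),
    z.Nodup → (z.toFinset ∪ l.toFinset).card ≤ 3 → (gInner z l).2 = [] := by
  induction l with
  | nil => intro z _ _; simp [gInner]
  | cons a rest ih =>
    intro z hnd hcard
    by_cases ha : a ∈ z
    · have hc : PySem.Set.contains z a = true := (PySem.Set.contains_iff z a).mpr ha
      simp only [gInner, hc, Bool.true_or, if_true, PySem.Set.add_of_mem ha]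
      refine ih z hnd (le_trans (Finset.card_le_card ?_) hcard)
      intro x hx
      simp only [Finset.mem_union, List.mem_toFinset, List.mem_cons] at hx ⊢
      tauto
    · have hsub : insert a z.toFinset ⊆ z.toFinset ∪ (a :: rest).toFinset := by
        intro x hx
        simp only [Finset.mem_insert, Finset.mem_union, List.mem_toFinset, List.mem_cons] at hx ⊢
        tauto
      have hins : (insert a z.toFinset).card = z.toFinset.card + 1 :=
        Finset.card_insert_of_notMem (by simpa using ha)
      have hlen : z.length < 3 := by
        have h1 : z.toFinset.card = z.length := by
          rw [List.card_toFinset, hnd.dedup]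
        have := Finset.card_le_card hsub
        omega
      have hlt : decide (PySem.Set.len z < 3) = true := by
        simp [PySem.Set.len]; omega
      simp only [gInner, hlt, Bool.or_true, if_true]
      refine ih (PySem.Set.add z a) (PySem.Set.nodup_add z a hnd)
        (le_trans (Finset.card_le_card ?_) hcard)
      intro x hx
      simp only [Finset.mem_union, List.mem_toFinset, PySem.Set.mem_add, List.mem_cons] at hx ⊢
      tauto

-- maximal end of the ≤3-distinct block starting at l
def mEnd (s : List Char) (l : Nat) : Nat :=
  s.length - (gInner PySem.Set.empty (s.drop l)).2.length

theorem mEnd_gt (s : List Char) (l : Nat) (hl : l < s.length) : l < mEnd s l := by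
  unfold mEnd
  have hd : s.drop l = s[l] :: s.drop (l + 1) := List.drop_eq_getElem_cons hl
  rw [hd, gInner_empty_cons]
  have := gInner_len_le (PySem.Set.add PySem.Set.empty s[l]) (s.drop (l + 1))
  have hlen : (s.drop (l + 1)).length = s.length - (l + 1) := List.length_drop
  omega

theorem mEnd_le (s : List Char) (l : Nat) : mEnd s l ≤ s.length := by
  unfold mEnd; omega

-- the window s[l:r]
def win (s : List Char) (l r : Nat) : List Char := (s.drop l).take (r - l)

-- the big inner-while simulation lemma
theorem inner_sim (s : List Char) : ∀ (k r l : Nat) (cnt : PySem.Dict Char Int) (d : Int)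
    (z : PySem.Set Char), s.length - r ≤ k → l ≤ r → r ≤ s.length →
    (∀ c, cnt.getD c 0 = ((win s l r).count c : Int)) →
    z.Nodup → (∀ c, c ∈ z ↔ c ∈ win s l r) →
    d = ((win s l r).toFinset.card : Int) →
    (let t := innerB s s.length cnt d r
     t.2.2 = s.length - (gInner z (s.drop r)).2.length ∧
     r ≤ t.2.2 ∧ t.2.2 ≤ s.length ∧
     (∀ c, t.1.getD c 0 = ((win s l t.2.2).count c : Int)) ∧
     (∀ c, c ∈ (gInner z (s.drop r)).1 ↔ c ∈ win s l t.2.2) ∧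
     t.2.1 = ((win s l t.2.2).toFinset.card : Int)) := by
  intro k
  induction k with
  | zero =>
    intro r l cnt d z hk hlr hrn hcnt hnd hmem hd
    have hr' : r = s.length := by omega
    rw [innerB, dif_neg (fun hh => absurd hh.1 (by omega))]
    have hdr : s.drop r = [] := by
      apply List.drop_eq_nil_of_le
      omega
    rw [hdr]
    simp only [gInner]
    exact ⟨by simp; omega, le_refl r, by omega, hcnt, fun c => hmem c, hd⟩
  | succ k ih =>
    intro r l cnt d z hk hlr hrn hcnt hnd hmem hd
    by_cases hr : r < s.length
    swap
    · have hr' : r = s.length := by omega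
      rw [innerB, dif_neg (fun hh => absurd hh.1 (by omega))]
      have hdr : s.drop r = [] := by
        apply List.drop_eq_nil_of_le
        omega
      rw [hdr]
      simp only [gInner]
      exact ⟨by simp; omega, le_refl r, by omega, hcnt, fun c => hmem c, hd⟩
    · -- main step
      have hc : s.getD r ' ' = s[r] := by
        rw [List.getD_eq_getElem?_getD, List.getElem?_eq_getElem hr]
        rfl
      have hdrop : s.drop r = s[r] :: s.drop (r + 1) := List.drop_eq_getElem_cons hr
      have hwin1 : win s l (r + 1) = win s l r ++ [s[r]] := by
        unfold win
        have h1 : r + 1 - l = (r - l) + 1 := by omega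
        rw [h1, List.take_add_one]
        have h3 : l + (r - l) = r := by omega
        have h2 : (s.drop l)[r - l]? = some s[r] := by
          rw [List.getElem?_drop, h3, List.getElem?_eq_getElem hr]
        rw [h2]
        rfl
      have hzcard : z.length = (win s l r).toFinset.card := by
        have h1 : z.toFinset = (win s l r).toFinset := by
          ext x
          simp only [List.mem_toFinset]
          exact hmem x
        rw [← h1, List.card_toFinset, hnd.dedup]
      have hcountiff : ∀ c, (0 < cnt.getD c 0) ↔ c ∈ win s l r := by
        intro c
        rw [hcnt c]
        rw [show ((0 : Int) < ((win s l r).count c : Int)) ↔ 0 < (win s l r).count c by exact_mod_cast Iff.rfl]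
        exact List.count_pos_iff
      by_cases hg : 0 < cnt.getD (s.getD r ' ') 0 ∨ d < 3
      · -- guard true: both loops take a step
        have hgb : (PySem.Set.contains z s[r] || decide (PySem.Set.len z < 3)) = true := by
          rcases hg with h1 | h1
          · rw [hc] at h1
            have := (hcountiff s[r]).mp h1
            rw [(PySem.Set.contains_iff z s[r]).mpr ((hmem s[r]).mpr this)]
            simp
          · have : z.length < 3 := by rw [hzcard]; omega
            have hlt : decide (PySem.Set.len z < 3) = true := by
              simp [PySem.Set.len]; omega
            rw [hlt]; simp
        rw [innerB, dif_pos ⟨hr, hg⟩]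
        simp only [hc]
        rw [hdrop]
        simp only [gInner, hgb, if_true]
        have hkey := ih (r + 1) l (cnt.insert s[r] (cnt.getD s[r] 0 + 1))
          (if (cnt.insert s[r] (cnt.getD s[r] 0 + 1)).getD s[r] 0 = 1 then d + 1 else d)
          (PySem.Set.add z s[r]) (by omega) (by omega) (by omega)
          ?_ (PySem.Set.nodup_add z s[r] hnd) ?_ ?_
        · obtain ⟨h1, h2, h3, h4, h5, h6⟩ := hkey
          exact ⟨h1, by omega, h3, h4, h5, h6⟩
        · -- counts over the extended window
          intro c
          rw [hwin1, PySem.Dict.getD_insert, List.count_append]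
          by_cases hce : c = s[r]
          · subst hce
            rw [if_pos rfl, hcnt s[r]]
            simp
          · rw [if_neg hce, hcnt c]
            have : [s[r]].count c = 0 := by
              simp [List.count_singleton]
              exact fun h => absurd h.symm hce
            rw [this]
            simp
        · -- membership over the extended window
          intro c
          rw [hwin1, PySem.Set.mem_add, List.mem_append, List.mem_singleton]
          rw [hmem c]
        · -- distinct count over the extended window
          rw [hwin1, PySem.Dict.getD_insert_self, hcnt s[r]]
          by_cases hin : s[r] ∈ win s l r
          · have hcp : 0 < (win s l r).count s[r] := List.count_pos_iff.mpr hin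
            rw [if_neg (by omega)]
            rw [hd]
            congr 2
            rw [List.toFinset_append]
            simp only [List.toFinset_cons, List.toFinset_nil]
            rw [Finset.union_comm]
            simp only [Finset.insert_union, Finset.empty_union]
            rw [Finset.insert_eq_self.mpr (List.mem_toFinset.mpr hin)]
          · have hcp : (win s l r).count s[r] = 0 := List.count_eq_zero.mpr hin
            rw [if_pos (by rw [hcp]; simp)]
            rw [hd]
            have : (win s l r ++ [s[r]]).toFinset = insert s[r] (win s l r).toFinset := by
              rw [List.toFinset_append]
              simp only [List.toFinset_cons, List.toFinset_nil]
              rw [Finset.union_comm]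
              simp
            rw [this, Finset.card_insert_of_notMem (by simpa using hin)]
            push_cast
            ring
      · -- guard false: both loops stop here
        have hnin : s[r] ∉ win s l r := by
          intro hinw
          exact hg (Or.inl (by rw [hc]; exact (hcountiff s[r]).mpr hinw))
        have hge3 : ¬ d < 3 := fun h => hg (Or.inr h)
        have hgb : ¬ (PySem.Set.contains z s[r] || decide (PySem.Set.len z < 3)) = true := by
          simp only [Bool.or_eq_true, decide_eq_true_eq, not_or]
          constructor
          · intro hcon
            exact hnin ((hmem s[r]).mp ((PySem.Set.contains_iff z s[r]).mp hcon))
          · intro hlt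
            have : z.length < 3 := by simpa [PySem.Set.len] using hlt
            rw [hzcard] at this
            omega
        rw [innerB, dif_neg (by intro hh; exact hg hh.2)]
        rw [hdrop]
        simp only [gInner]
        rw [if_neg hgb]
        refine ⟨?_, le_refl r, by omega, hcnt, fun c => hmem c, hd⟩
        have : (s[r] :: s.drop (r + 1)).length = s.length - r := by
          rw [← hdrop]
          exact List.length_drop
        simp only [this]
        omega

-- outer-loop invariant: after processing 0..m-1, jump holds mEnd on [0,m)
theorem outer_inv (s : List Char) : ∀ (m : Nat), m ≤ s.length →
    (let st := (List.range m).foldl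
      (fun st l =>
        let t := innerB s s.length st.2.1 st.2.2.1 st.2.2.2
        let jump := st.1.set l t.2.2
        let c := s.getD l ' '
        let cnt2 := t.1.insert c (t.1.getD c 0 - 1)
        (jump, cnt2, (if cnt2.getD c 0 = 0 then t.2.1 - 1 else t.2.1), t.2.2))
      (List.replicate s.length 0, PySem.Dict.empty, 0, 0)
     st.1.length = s.length ∧
     (∀ j, j < m → st.1.getD j 0 = mEnd s j) ∧
     m ≤ st.2.2.2 ∧ st.2.2.2 ≤ s.length ∧
     (∀ c, st.2.1.getD c 0 = ((win s m st.2.2.2).count c : Int)) ∧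
     st.2.2.1 = ((win s m st.2.2.2).toFinset.card : Int) ∧
     (gInner PySem.Set.empty (win s m st.2.2.2)).2 = []) := by
  intro m
  induction m with
  | zero =>
    intro _
    simp only [List.range_zero, List.foldl_nil]
    have hw : win s 0 0 = [] := by simp [win]
    refine ⟨List.length_replicate, by omega, le_refl 0, Nat.zero_le _, ?_, ?_, ?_⟩
    · intro c
      rw [hw, PySem.Dict.getD_empty]
      simp
    · rw [hw]; simp
    · rw [hw]; simp [gInner]
  | succ m ih =>
    intro hm1
    have hmn : m < s.length := by omega
    obtain ⟨hlen, hjump, hmr, hrn, hcnt, hcard, hI0⟩ := ih (by omega)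
    rw [List.range_succ, List.foldl_append, List.foldl_cons, List.foldl_nil]
    -- name the state after m iterations
    set st := (List.range m).foldl
      (fun st l =>
        let t := innerB s s.length st.2.1 st.2.2.1 st.2.2.2
        let jump := st.1.set l t.2.2
        let c := s.getD l ' '
        let cnt2 := t.1.insert c (t.1.getD c 0 - 1)
        (jump, cnt2, (if cnt2.getD c 0 = 0 then t.2.1 - 1 else t.2.1), t.2.2))
      (List.replicate s.length 0, PySem.Dict.empty, 0, 0) with hst
    simp only []
    -- the set z of the current window, rebuilt by the greedy from scratch
    have hznd : ((gInner PySem.Set.empty (win s m st.2.2.2)).1).Nodup :=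
      gInner_nodup _ _ List.nodup_nil
    have hzmem : ∀ c, c ∈ (gInner PySem.Set.empty (win s m st.2.2.2)).1 ↔ c ∈ win s m st.2.2.2 := by
      intro c
      rw [gInner_mem_of_consumed _ _ hI0 c]
      simp [PySem.Set.empty]
    have hkey := inner_sim s (s.length - st.2.2.2) st.2.2.2 m st.2.1 st.2.2.1
      (gInner PySem.Set.empty (win s m st.2.2.2)).1 (le_refl _) hmr hrn hcnt hznd hzmem hcard
    obtain ⟨ht1, ht2, ht3, ht4, ht5, ht6⟩ := hkey
    -- the inner while lands exactly on mEnd s m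
    have hsplit : win s m st.2.2.2 ++ s.drop st.2.2.2 = s.drop m := by
      unfold win
      rw [show s.drop st.2.2.2 = (s.drop m).drop (st.2.2.2 - m) by
        rw [List.drop_drop]; congr 1; omega]
      exact List.take_append_drop _ _
    have hres : gInner PySem.Set.empty (s.drop m)
        = gInner (gInner PySem.Set.empty (win s m st.2.2.2)).1 (s.drop st.2.2.2) := by
      rw [← hsplit]
      exact gInner_append _ _ _ hI0
    have hmEnd : (innerB s s.length st.2.1 st.2.2.1 st.2.2.2).2.2 = mEnd s m := by
      rw [ht1]
      unfold mEnd
      rw [hres]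
    set t := innerB s s.length st.2.1 st.2.2.1 st.2.2.2 with htdef
    have hgt : m < t.2.2 := by rw [hmEnd]; exact mEnd_gt s m hmn
    have hcm : s.getD m ' ' = s[m] := by
      rw [List.getD_eq_getElem?_getD, List.getElem?_eq_getElem hmn]
      rfl
    have hwcons : win s m t.2.2 = s[m] :: win s (m + 1) t.2.2 := by
      unfold win
      rw [List.drop_eq_getElem_cons hmn]
      rw [show t.2.2 - m = (t.2.2 - (m + 1)) + 1 by omega]
      rfl
    -- distinct bound for the window after the inner while
    have hzlen3 : ((gInner (gInner PySem.Set.empty (win s m st.2.2.2)).1 (s.drop st.2.2.2)).1).length ≤ 3 := by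
      apply gInner_len_le3
      apply gInner_len_le3
      simp [PySem.Set.empty]
    have hznd2 : ((gInner (gInner PySem.Set.empty (win s m st.2.2.2)).1 (s.drop st.2.2.2)).1).Nodup :=
      gInner_nodup _ _ hznd
    have hcard3 : (win s m t.2.2).toFinset.card ≤ 3 := by
      have h1 : (win s m t.2.2).toFinset
          = ((gInner (gInner PySem.Set.empty (win s m st.2.2.2)).1 (s.drop st.2.2.2)).1).toFinset := by
        ext x
        simp only [List.mem_toFinset]
        exact (ht5 x).symm
      rw [h1, List.card_toFinset, hznd2.dedup]
      exact hzlen3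
    have hcnt2 : ∀ c, ((t.1.insert (s.getD m ' ') (t.1.getD (s.getD m ' ') 0 - 1)).getD c 0)
        = ((win s (m + 1) t.2.2).count c : Int) := by
      intro c
      rw [hcm, PySem.Dict.getD_insert]
      by_cases hce : c = s[m]
      · subst hce
        rw [if_pos rfl, ht4 s[m], hwcons, List.count_cons_self]
        push_cast
        ring
      · rw [if_neg hce, ht4 c, hwcons]
        have hcc : List.count c (s[m] :: win s (m + 1) t.2.2)
            = List.count c (win s (m + 1) t.2.2) := by
          simp [List.count_cons]
          exact fun h => absurd h.symm hce
        rw [hcc]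
    refine ⟨?_, ?_, ?_, ?_, hcnt2, ?_, ?_⟩
    · rw [List.length_set]; exact hlen
    · intro j hj
      rcases Nat.lt_succ_iff_lt_or_eq.mp hj with hjm | hjm
      · rw [List.getD_eq_getElem?_getD, List.getElem?_set_ne (by omega), ← List.getD_eq_getElem?_getD]
        exact hjump j hjm
      · subst hjm
        rw [List.getD_eq_getElem?_getD, List.getElem?_set_self (by omega)]
        simpa using hmEnd
    · omega
    · exact ht3
    · -- distinct counter after removing s[m]
      rw [hcnt2 (s.getD m ' '), hcm]
      have hd1 : t.2.1 = ((win s m t.2.2).toFinset.card : Int) := ht6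
      rw [hwcons] at hd1
      simp only [List.toFinset_cons] at hd1
      by_cases hin : s[m] ∈ win s (m + 1) t.2.2
      · rw [if_neg (by
          have : 0 < (win s (m + 1) t.2.2).count s[m] := List.count_pos_iff.mpr hin
          omega)]
        rw [hd1, Finset.insert_eq_self.mpr (List.mem_toFinset.mpr hin)]
      · rw [if_pos (by rw [List.count_eq_zero.mpr hin]; simp)]
        rw [hd1, Finset.card_insert_of_notMem (by simpa using hin)]
        push_cast
        ring
    · -- the greedy still consumes the whole shortened window
      apply gInner_consume _ _ List.nodup_nil
      have hsub : (win s (m + 1) t.2.2).toFinset ⊆ (win s m t.2.2).toFinset := by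
        rw [hwcons]
        simp only [List.toFinset_cons]
        exact Finset.subset_insert _ _
      calc (PySem.Set.empty.toFinset ∪ (win s (m + 1) t.2.2).toFinset).card
          = (win s (m + 1) t.2.2).toFinset.card := by
            simp [PySem.Set.empty]
        _ ≤ (win s m t.2.2).toFinset.card := Finset.card_le_card hsub
        _ ≤ 3 := hcard3

-- the chase over correct jump values computes the group recursion
theorem chase_eq (s : List Char) (jump : List Nat)
    (hj : ∀ j, j < s.length → jump.getD j 0 = mEnd s j) :
    ∀ (fuel i : Nat) (res : Int), i < s.length → s.length - i ≤ fuel →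
    chaseB jump s.length fuel i res = gOuter (s.drop i) res := by
  intro fuel
  induction fuel with
  | zero => intro i res hi hf; omega
  | succ fuel ih =>
    intro i res hi hf
    have hji : jump.getD i 0 = mEnd s i := hj i hi
    obtain ⟨c, rest, hd⟩ : ∃ c rest, s.drop i = c :: rest := by
      cases hdd : s.drop i with
      | nil =>
        exfalso
        have : (s.drop i).length = s.length - i := List.length_drop
        rw [hdd] at this
        simp at this
        omega
      | cons c rest => exact ⟨c, rest, rfl⟩
    have hlen : (s.drop i).length = s.length - i := List.length_drop
    have hrem : (gInner PySem.Set.empty (s.drop i)).2.length = s.length - mEnd s i := by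
      unfold mEnd
      have := gInner_len_le PySem.Set.empty (s.drop i)
      omega
    have hgt := mEnd_gt s i hi
    have hle := mEnd_le s i
    have hdrop : (gInner PySem.Set.empty (s.drop i)).2 = s.drop (mEnd s i) := by
      rw [gInner_rest_drop (s.drop i) PySem.Set.empty, List.drop_drop, hrem]
      congr 1
      omega
    by_cases hm : mEnd s i < s.length
    · have hguard : i < s.length ∧ jump.getD i 0 < s.length := ⟨hi, by rw [hji]; exact hm⟩
      rw [chaseB, if_pos hguard, hji]
      rw [ih (mEnd s i) (res + 1) hm (by omega)]
      rw [hd, gOuter, ← hd, hdrop]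
      have hne : s.drop (mEnd s i) ≠ [] := by
        intro h
        have : (s.drop (mEnd s i)).length = s.length - mEnd s i := List.length_drop
        rw [h] at this
        simp at this
        omega
      rw [if_neg hne]
    · have hm' : mEnd s i = s.length := le_antisymm hle (not_lt.mp hm)
      rw [chaseB, if_neg (by rw [hji, hm']; omega)]
      rw [hd, gOuter, ← hd, hdrop, hm', List.drop_length, if_pos rfl]

theorem check_alt_eq_gOuter (w : String) : check_alt w = gOuter w.toList 1 := by
  unfold check_alt
  by_cases hn : w.toList.length = 0
  · rw [List.length_eq_zero_iff.mp hn]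
    simp [chaseB, gOuter, outerB]
  · obtain ⟨_, hj, -⟩ := outer_inv w.toList w.toList.length le_rfl
    have := chase_eq w.toList (outerB w.toList w.toList.length).1
      (fun j hjlt => hj j hjlt) w.toList.length 0 1 (by omega) (by omega)
    rw [this, List.drop_zero]

-- ===== VERDICT (by name: the statement is the Claim_ definition above) =====
theorem check_spec : Claim_equal_check := by
  intro w _
  unfold Spec_check
  rw [check_eq_gOuter, check_alt_eq_gOuter]
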